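-- pv_equiv track=rewrite | github.com/amirrezamirzaei/Bioinformatic_Algorithms_Course | Motif Finding/ba2b-Find a Median String.py | compute_max_hamming_dist
-- ===== SOURCE A (Python) =====
-- def compute_max_hamming_dist(kmer, dna):
--     max_hamming = 0
--     for i in range(0, len(dna) - len(kmer) + 1):
--         tmp = dna[i:i + len(kmer)]
--         hamming = 0
--         for i in range(0, len(kmer)):
--             if kmer[i] == tmp[i]:
--                 hamming += 1
--         if hamming > max_hamming:
--             max_hamming = hamming
--             if max_hamming == len(kmer):
--                 break
--     return max_hamming
-- ===== SOURCE B (Python) =====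
-- def compute_max_hamming_dist(kmer, dna):
--     # Column-wise accumulation: keep one running match-count per alignment and,
--     # for each kmer position, bump every alignment it matches in one vectorized pass.
--     cnt = [0] * (len(dna) - len(kmer) + 1)
--     for p, c in enumerate(kmer):
--         cnt = [m + (c == dna[i + p]) for i, m in enumerate(cnt)]
--     return max(cnt, default=0)
-- ===== Notes on version B (the rewrite author's own statement) =====
-- stated objective: alternative
-- what changed: A scans each window of dna with an inner per-window loop and an early break; B instead sweeps the kmer once, maintaining one running match-count per alignment (column-wise accumulator array) and returns the max of the counts.
import Mathlib
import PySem

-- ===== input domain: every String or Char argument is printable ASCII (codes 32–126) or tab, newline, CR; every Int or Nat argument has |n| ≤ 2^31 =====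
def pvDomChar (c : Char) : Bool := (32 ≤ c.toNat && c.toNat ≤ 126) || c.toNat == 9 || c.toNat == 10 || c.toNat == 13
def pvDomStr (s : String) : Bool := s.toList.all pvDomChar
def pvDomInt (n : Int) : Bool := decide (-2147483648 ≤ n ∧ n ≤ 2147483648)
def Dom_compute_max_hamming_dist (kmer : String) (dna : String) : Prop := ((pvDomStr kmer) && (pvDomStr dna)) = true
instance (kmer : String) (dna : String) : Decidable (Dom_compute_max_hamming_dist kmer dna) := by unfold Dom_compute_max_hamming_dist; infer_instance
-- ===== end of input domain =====

-- B replaces A's per-window scan with early break by a column-wise accumulator of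
-- match counts per alignment (objective: alternative algorithm, same asymptotic cost).

-- ===== PORT A =====
-- inner loop: for i in range(0, len(kmer)): if kmer[i] == tmp[i]: hamming += 1
-- Every index is in range on every reachable call (i ≤ len(dna)-len(kmer)), so the
-- pyGet? options compared here are always `some`: the port is exact, Python never raises.
def pvAInner (kl tl : List Char) : Int :=
  (PySem.List.pyRange 0 (kl.length : Int)).foldl
    (fun hamming i =>
      if PySem.List.pyGet? kl i == PySem.List.pyGet? tl i then hamming + 1 else hamming) 0

-- outer loop with the `break` on max_hamming == len(kmer), as structural recursion
def pvALoop (kl dl : List Char) (idxs : List Int) (maxHamming : Int) : Int :=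
  match idxs with
  | [] => maxHamming
  | i :: rest =>
    let tmp := PySem.List.slice dl (some i) (some (i + (kl.length : Int)))
    let hamming := pvAInner kl tmp
    if hamming > maxHamming then
      (if hamming = (kl.length : Int) then hamming else pvALoop kl dl rest hamming)
    else pvALoop kl dl rest maxHamming

def compute_max_hamming_dist (kmer : String) (dna : String) : Int :=
  pvALoop kmer.toList dna.toList
    (PySem.List.pyRange 0 ((dna.toList.length : Int) - (kmer.toList.length : Int) + 1)) 0

-- ===== PORT B =====
-- cnt = [m + (c == dna[i + p]) for i, m in enumerate(cnt)]
-- dna[i+p] is always in range on every reachable call, so pyGet? is always `some`: exact.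
def pvBStep (dl : List Char) (cnt : List Int) (pc : Int × Char) : List Int :=
  (PySem.List.enumerate cnt).map
    (fun im => im.2 + (if some pc.2 == PySem.List.pyGet? dl (im.1 + pc.1) then 1 else 0))

def compute_max_hamming_dist_alt (kmer : String) (dna : String) : Int :=
  let kl := kmer.toList
  let dl := dna.toList
  let cnt := (PySem.List.enumerate kl).foldl (pvBStep dl)
      (PySem.List.pyRepeat [(0 : Int)] ((dl.length : Int) - (kl.length : Int) + 1))
  match PySem.List.max? cnt (fun y => y) with   -- max(cnt, default=0)
  | some m => m
  | none => 0

-- ===== PRECONDITION & SPEC =====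
def Spec_compute_max_hamming_dist (kmer : String) (dna : String) (out : Int) : Prop := out = compute_max_hamming_dist_alt kmer dna
instance (kmer : String) (dna : String) (out : Int) : Decidable (Spec_compute_max_hamming_dist kmer dna out) := by unfold Spec_compute_max_hamming_dist; infer_instance

-- ===== CLAIM (what is proved, stated in full; the proofs are below) =====
def Claim_equal_compute_max_hamming_dist : Prop := ∀ (kmer : String) (dna : String), Dom_compute_max_hamming_dist kmer dna → Spec_compute_max_hamming_dist kmer dna (compute_max_hamming_dist kmer dna)

-- ===== LEMMAS AND PROOFS =====

-- the number of matching positions of kmer against the window of dna starting at i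
def pvMc (kl dl : List Char) (i : Nat) : Int :=
  ((List.range kl.length).countP (fun p => kl[p]? == dl[i + p]?) : Int)

theorem pvMc_nonneg (kl dl : List Char) (i : Nat) : 0 ≤ pvMc kl dl i := by
  unfold pvMc; positivity

theorem pvMc_le (kl dl : List Char) (i : Nat) : pvMc kl dl i ≤ (kl.length : Int) := by
  unfold pvMc
  have h := List.countP_le_length (l := List.range kl.length)
    (p := fun p => kl[p]? == dl[i + p]?)
  simp only [List.length_range] at h
  exact_mod_cast h

theorem pvAInner_eq (kl dl : List Char) (j : Nat) :
    pvAInner kl (PySem.List.slice dl (some (j : Int)) (some ((j : Int) + (kl.length : Int)))) =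
      pvMc kl dl j := by
  unfold pvAInner pvMc
  rw [PySem.List.slice_natCast_add, PySem.List.pyRange_one, List.foldl_map]
  simp only [zero_add, Int.sub_zero, Int.toNat_natCast, PySem.List.pyGet?_natCast]
  rw [PySem.List.foldl_count_if
    (p := fun k => kl[k]? == ((dl.drop j).take kl.length)[k]?)]
  simp only [zero_add, Nat.cast_inj]
  apply List.countP_congr
  intro p hp
  have hlt : p < kl.length := List.mem_range.mp hp
  simp [hlt, List.getElem?_drop]

theorem pvFold_const (kl dl : List Char) (js : List Nat) (m : Int)
    (h : ∀ j, pvMc kl dl j ≤ m) :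
    js.foldl (fun acc j => max acc (pvMc kl dl j)) m = m := by
  induction js with
  | nil => rfl
  | cons j t ih =>
    rw [List.foldl_cons, max_eq_left (h j)]
    exact ih

theorem pvALoop_eq (kl dl : List Char) (js : List Nat) (m : Int)
    (hm0 : 0 ≤ m) (hmk : m ≤ (kl.length : Int)) :
    pvALoop kl dl (js.map (Nat.cast : Nat → Int)) m =
      js.foldl (fun acc j => max acc (pvMc kl dl j)) m := by
  induction js generalizing m with
  | nil => rfl
  | cons j t ih =>
    simp only [List.map_cons, List.foldl_cons]
    show (let tmp := PySem.List.slice dl (some ((j : Nat) : Int)) (some (((j : Nat) : Int) + (kl.length : Int)))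
          let hamming := pvAInner kl tmp
          if hamming > m then
            (if hamming = (kl.length : Int) then hamming else pvALoop kl dl (t.map (Nat.cast : Nat → Int)) hamming)
          else pvALoop kl dl (t.map (Nat.cast : Nat → Int)) m) = _
    simp only [pvAInner_eq]
    by_cases hgt : pvMc kl dl j > m
    · by_cases hk : pvMc kl dl j = (kl.length : Int)
      · rw [if_pos hgt, if_pos hk, max_eq_right (le_of_lt hgt)]
        exact (pvFold_const kl dl t _ (fun j' => by rw [hk]; exact pvMc_le kl dl j')).symm
      · rw [if_pos hgt, if_neg hk, max_eq_right (le_of_lt hgt)]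
        exact ih _ (le_trans hm0 (le_of_lt hgt)) (pvMc_le kl dl j)
    · rw [if_neg hgt, max_eq_left (le_of_not_gt hgt)]
      exact ih m hm0 hmk

theorem pvBStep_map_range (dl : List Char) (W : Nat) (g : Nat → Int) (s : Nat) (c : Char) :
    pvBStep dl ((List.range W).map g) ((s : Int), c) =
      (List.range W).map (fun i => g i + (if some c == dl[i + s]? then 1 else 0)) := by
  unfold pvBStep
  rw [PySem.List.enumerate_eq_map_pyRange _ 0]
  have hlen : PySem.List.len ((List.range W).map g) = (W : Int) := by
    simp [PySem.List.len]
  rw [hlen, PySem.List.pyRange_one, List.map_map, List.map_map]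
  simp only [Int.sub_zero, Int.toNat_natCast]
  apply List.map_congr_left
  intro i hi
  have hiW : i < W := List.mem_range.mp hi
  simp only [Function.comp, zero_add, PySem.List.pyGetD_natCast,
    PySem.List.getD_map_range g W i 0 hiW]
  have : ((i : Int) + (s : Int)) = ((i + s : Nat) : Int) := by push_cast; ring
  rw [this, PySem.List.pyGet?_natCast]

theorem pvBLoop_eq (dl : List Char) (W : Nat) (suf : List Char) :
    ∀ (s : Nat) (g : Nat → Int),
    (PySem.List.enumerate suf (s : Int)).foldl (pvBStep dl) ((List.range W).map g) =
      (List.range W).map (fun i =>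
        g i + ((List.range suf.length).countP (fun p => suf[p]? == dl[i + s + p]?) : Int)) := by
  induction suf with
  | nil =>
    intro s g
    simp [PySem.List.enumerate_nil]
  | cons c suf ih =>
    intro s g
    rw [PySem.List.enumerate_cons, List.foldl_cons, pvBStep_map_range]
    have hcast : ((s : Int) + 1) = ((s + 1 : Nat) : Int) := by push_cast; ring
    rw [hcast, ih (s + 1) (fun i => g i + (if some c == dl[i + s]? then 1 else 0))]
    apply List.map_congr_left
    intro i _
    simp only [List.length_cons, List.range_succ_eq_map, List.countP_cons, List.countP_map]
    have harith : ∀ p : Nat, i + s + (p + 1) = i + (s + 1) + p := by intro p; omega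
    have hcp : (List.range suf.length).countP
        ((fun p => (c :: suf)[p]? == dl[i + s + p]?) ∘ Nat.succ) =
        (List.range suf.length).countP (fun p => suf[p]? == dl[i + (s + 1) + p]?) := by
      apply List.countP_congr
      intro p _
      simp [Function.comp, Nat.succ_eq_add_one, harith p]
    rw [hcp]
    have h0 : ((c :: suf)[0]? == dl[i + s + 0]?) = (some c == dl[i + s]?) := by
      simp
    rw [h0]
    push_cast
    by_cases hb : some c == dl[i + s]?
    · simp [hb]; ring
    · simp [hb]

theorem pvMaxFold (f : Nat → Int) (hf : 0 ≤ f 0) (n : Nat) :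
    (match PySem.List.max? ((List.range n).map f) (fun y => y) with
     | some m => m
     | none => 0) =
      (List.range n).foldl (fun acc j => max acc (f j)) 0 := by
  cases n with
  | zero => simp [PySem.List.max?]
  | succ m =>
    rw [List.range_succ_eq_map]
    simp only [List.map_cons, List.map_map, PySem.List.max?_id_cons, List.foldl_cons,
      List.foldl_map]
    rw [max_eq_right hf]
    rfl

-- ===== VERDICT (by name: the statement is the Claim_ definition above) =====
theorem compute_max_hamming_dist_spec : Claim_equal_compute_max_hamming_dist := by
  intro kmer dna _
  unfold Spec_compute_max_hamming_dist compute_max_hamming_dist compute_max_hamming_dist_alt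
  dsimp only
  set kl := kmer.toList with hkl
  set dl := dna.toList with hdl
  set W : Int := (dl.length : Int) - (kl.length : Int) + 1 with hW
  have hA : pvALoop kl dl (PySem.List.pyRange 0 W) 0 =
      (List.range W.toNat).foldl (fun acc j => max acc (pvMc kl dl j)) 0 := by
    rw [PySem.List.pyRange_one]
    simp only [Int.sub_zero, zero_add]
    exact pvALoop_eq kl dl (List.range W.toNat) 0 le_rfl (Int.natCast_nonneg _)
  have hrep : PySem.List.pyRepeat [(0 : Int)] W = (List.range W.toNat).map (fun _ => (0 : Int)) := by
    rw [PySem.List.pyRepeat_singleton]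
    induction W.toNat with
    | zero => rfl
    | succ n ihn => rw [List.replicate_succ', List.range_succ, List.map_append, ← ihn]; rfl
  have hb0 := pvBLoop_eq dl W.toNat kl 0 (fun _ => (0 : Int))
  simp only [Nat.cast_zero] at hb0
  have hB : (PySem.List.enumerate kl).foldl (pvBStep dl) (PySem.List.pyRepeat [(0 : Int)] W) =
      (List.range W.toNat).map (pvMc kl dl) := by
    rw [hrep, hb0]
    apply List.map_congr_left
    intro i _
    simp [pvMc]
  rw [hA, hB, pvMaxFold (pvMc kl dl) (pvMc_nonneg kl dl 0) W.toNat]
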